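-- pv_equiv track=rewrite | github.com/clarencenhuang/programming-challenges | geeksforgeeks/tile_stacking_problem.py | build_tower_dp
-- ===== SOURCE A (Python) =====
-- def build_tower_dp(n, m, k):
--     dp = [[0] * (m+1) for _ in range(n+1)]
--     for x in range(m+1):
--         dp[0][x] = 1 # we can always build a tower of size 0, just don't use any brickz
--     for i in range(1, n + 1):
--         for j in range(1, m + 1):
--             dp[i][j] += dp[i][j-1] # don't use the j-th brick
--             for y in range(1, k+1):
--                 if i >= y:
--                     dp[i][j] += dp[i - y][j - 1] # use the jth brick i-times
--     return dp[-1][-1]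
-- ===== SOURCE B (Python) =====
-- def build_tower_dp(n, m, k):
--     # Same DP, but the inner k-sum over the previous column is replaced by a
--     # prefix-sum window, processing the table column by column: O(n*m) vs O(n*m*k).
--     col = [1] + [0] * n          # column j = 0: one empty tower of height 0
--     kk = max(k, 0)
--     for _ in range(m):
--         pref = [0]
--         for v in col:
--             pref.append(pref[-1] + v)
--         col = [col[i] + pref[i] - pref[max(0, i - kk)] for i in range(n + 1)]
--     return col[n]
-- ===== Notes on version B (the rewrite author's own statement) =====
-- stated objective: faster
-- what changed: Replaces the 2D table with the inner loop over all k tile-counts by a column-by-column DP that uses a prefix-sum array, so the k-window sum becomes two lookups: O(n*m) instead of O(n*m*k).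
import Mathlib
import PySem

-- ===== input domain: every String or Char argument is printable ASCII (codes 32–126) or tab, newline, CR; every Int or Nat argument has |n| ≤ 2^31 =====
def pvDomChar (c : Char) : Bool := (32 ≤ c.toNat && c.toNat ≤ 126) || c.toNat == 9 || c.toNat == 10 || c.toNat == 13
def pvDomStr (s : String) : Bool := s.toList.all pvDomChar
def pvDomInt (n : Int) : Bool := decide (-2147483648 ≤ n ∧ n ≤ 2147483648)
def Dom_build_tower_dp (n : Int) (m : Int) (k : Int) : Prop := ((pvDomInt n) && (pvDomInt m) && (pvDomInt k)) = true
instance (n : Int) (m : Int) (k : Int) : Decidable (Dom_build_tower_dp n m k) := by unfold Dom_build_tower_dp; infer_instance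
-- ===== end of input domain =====

-- B replaces A's inner loop over the k tile-counts by a prefix-sum window over the
-- previous DP column, processing the table column by column (O(n*m) work vs A's O(n*m*k)).

-- ===== PORT A =====
-- dp[i][j] read/write helpers: every index A uses is in range under Pre_, so the
-- defaults of pyGetD/pySetD are never taken there (exact on the admitted domain)
def pvGet2 (dp : List (List Int)) (i j : Int) : Int :=
  PySem.List.pyGetD (PySem.List.pyGetD dp i []) j 0
def pvSet2 (dp : List (List Int)) (i j : Int) (v : Int) : List (List Int) :=
  PySem.List.pySetD dp i (PySem.List.pySetD (PySem.List.pyGetD dp i []) j v)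

def build_tower_dp (n : Int) (m : Int) (k : Int) : Int :=
  let dp : List (List Int) :=
    (PySem.List.pyRange 0 (n+1) 1).map (fun _ => List.replicate (m+1).toNat (0:Int))
  let dp := (PySem.List.pyRange 0 (m+1) 1).foldl (fun d x => pvSet2 d 0 x 1) dp
  let dp := (PySem.List.pyRange 1 (n+1) 1).foldl (fun d i =>
      (PySem.List.pyRange 1 (m+1) 1).foldl (fun d j =>
        let d := pvSet2 d i j (pvGet2 d i j + pvGet2 d i (j-1))
        (PySem.List.pyRange 1 (k+1) 1).foldl (fun d y =>
          if i ≥ y then pvSet2 d i j (pvGet2 d i j + pvGet2 d (i-y) (j-1)) else d) d) d) dp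
  pvGet2 dp (-1) (-1)

-- ===== PORT B =====
-- the 'pref' loop of Source B: pref = [0]; for v in c: pref.append(pref[-1] + v)
def pvPref (p : List Int) (c : List Int) : List Int :=
  match c with
  | [] => p
  | v :: rest => pvPref (p ++ [PySem.List.pyGetD p (-1) 0 + v]) rest

def build_tower_dp_alt (n : Int) (m : Int) (k : Int) : Int :=
  let col : List Int := 1 :: List.replicate n.toNat (0:Int)
  let kk := max k 0
  let col := (PySem.List.pyRange 0 m 1).foldl (fun c _ =>
      let pref := pvPref [0] c
      (PySem.List.pyRange 0 (n+1) 1).map (fun i =>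
        PySem.List.pyGetD c i 0 + PySem.List.pyGetD pref i 0
          - PySem.List.pyGetD pref (max 0 (i - kk)) 0)) col
  PySem.List.pyGetD col n 0

-- ===== PRECONDITION & SPEC =====
-- Pre_ excludes exactly the inputs on which the Python A raises IndexError:
-- whenever n < 0 or m < 0 it hits an empty list/row (dp[0][x] or dp[-1][-1]).
def Pre_build_tower_dp (n : Int) (m : Int) (k : Int) : Prop := 0 ≤ n ∧ 0 ≤ m
instance (n : Int) (m : Int) (k : Int) : Decidable (Pre_build_tower_dp n m k) := by
  unfold Pre_build_tower_dp; infer_instance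

def pvWitness_build_tower_dp : Int × Int × Int := (3, 3, 2)

def Spec_build_tower_dp (n : Int) (m : Int) (k : Int) (out : Int) : Prop := out = build_tower_dp_alt n m k
instance (n : Int) (m : Int) (k : Int) (out : Int) : Decidable (Spec_build_tower_dp n m k out) := by
  unfold Spec_build_tower_dp; infer_instance

-- ===== CLAIM (what is proved, stated in full; the proofs are below) =====
def Claim_equal_build_tower_dp : Prop := ∀ (n : Int) (m : Int) (k : Int), Dom_build_tower_dp n m k → Pre_build_tower_dp n m k → Spec_build_tower_dp n m k (build_tower_dp n m k)

-- ===== LEMMAS AND PROOFS =====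

-- pvT K i j is the common value dp[i][j] of the recurrence (K = allowed copies per tile)
def pvT (K : Nat) : Nat → Nat → Int
  | 0, _ => 1
  | _+1, 0 => 0
  | i+1, j+1 => pvT K (i+1) j + ((List.range (min K (i+1))).map (fun y => pvT K (i-y) j)).sum
termination_by i j => (i, j)
decreasing_by
  · exact Prod.Lex.right _ (by omega)
  · exact Prod.Lex.left _ _ (by omega)

theorem map_range_congr {α : Type} (q : Nat) (f g : Nat → α) (h : ∀ j, j < q → f j = g j) :
    (List.range q).map f = (List.range q).map g := by
  apply List.map_congr_left
  intro x hx
  exact h x (List.mem_range.mp hx)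

theorem pvPref_spec (c : List Int) : ∀ (p : List Int) (s : Int),
    pvPref (p ++ [s]) c = (p ++ [s]) ++ (List.range c.length).map (fun t => s + (c.take (t+1)).sum) := by
  induction c with
  | nil => intro p s; simp [pvPref]
  | cons v r ih =>
    intro p s
    rw [pvPref, PySem.List.pyGetD_neg_one_append_singleton]
    rw [ih (p ++ [s]) (s + v)]
    rw [List.length_cons, List.range_succ_eq_map, List.map_cons, List.map_map]
    have hf : ((fun t => s + ((v :: r).take (t+1)).sum) ∘ Nat.succ)
        = (fun t => (s + v) + (r.take (t+1)).sum) := by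
      funext t
      simp only [Function.comp_apply, List.take_succ_cons, List.sum_cons]
      ring
    rw [hf]
    simp only [List.take_succ_cons, List.take_zero, List.sum_cons, List.sum_nil, add_zero,
      List.append_assoc, List.cons_append, List.nil_append]

theorem pvPref_getD (c : List Int) (i : Nat) (hi : i ≤ c.length) :
    (pvPref [0] c).getD i 0 = (c.take i).sum := by
  have h := pvPref_spec c [] 0
  simp only [List.nil_append] at h
  rw [h]
  cases i with
  | zero => simp
  | succ t =>
    simp only [List.singleton_append, List.getD_cons_succ]
    rw [PySem.List.getD_map_range _ _ _ _ (by omega)]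
    simp

theorem window_sum (f : Nat → Int) (i : Nat) : ∀ (K : Nat),
    ((List.range (min K (i+1))).map (fun y => f (i - y))).sum
      = ((List.range (i+1)).map f).sum - ((List.range (i+1 - K)).map f).sum := by
  intro K
  induction K with
  | zero => simp
  | succ K ih =>
    by_cases hK : K ≤ i
    · have h1 : min (K+1) (i+1) = K+1 := by omega
      have h2 : min K (i+1) = K := by omega
      have h3 : i + 1 - K = (i - K) + 1 := by omega
      have h4 : i + 1 - (K+1) = i - K := by omega
      rw [h1, List.range_succ, List.map_append, List.sum_append, h4]
      rw [h2] at ih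
      rw [ih, h3, List.range_succ, List.map_append, List.sum_append]
      rw [List.range_succ, List.map_append, List.sum_append]
      simp only [List.map_cons, List.map_nil, List.sum_cons, List.sum_nil, add_zero]
      ring
    · have h1 : min (K+1) (i+1) = min K (i+1) := by omega
      have h2 : i + 1 - (K+1) = i + 1 - K := by omega
      rw [h1, h2, ih]

theorem ysum (f : Nat → Int) (i : Nat) : ∀ (K : Nat),
    ((List.range K).map (fun y => if y + 1 ≤ i then f (i - (y+1)) else 0)).sum
      = ((List.range (min K i)).map (fun y => f (i - 1 - y))).sum := by
  intro K
  induction K with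
  | zero => simp
  | succ K ih =>
    rw [List.range_succ, List.map_append, List.sum_append]
    by_cases hK : K + 1 ≤ i
    · have h1 : min (K+1) i = K+1 := by omega
      rw [h1, List.range_succ, List.map_append, List.sum_append, ih]
      have h2 : min K i = K := by omega
      rw [h2]
      simp only [List.map_cons, List.map_nil, List.sum_cons, List.sum_nil]
      rw [if_pos hK]
      have : i - (K+1) = i - 1 - K := by omega
      rw [this]
    · have h1 : min (K+1) i = min K i := by omega
      rw [h1, ← ih]
      simp only [List.map_cons, List.map_nil, List.sum_cons, List.sum_nil, if_neg hK, add_zero]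

theorem foldl_pyRange_inv {σ : Type} (body : σ → Int → σ) (P : Int → σ) (a b : Int)
    (hab : a ≤ b) (h : ∀ x, a ≤ x → x < b → body (P x) x = P (x+1)) :
    (PySem.List.pyRange a b 1).foldl body (P a) = P b := by
  obtain ⟨c, hc⟩ : ∃ c : Nat, a + c = b := ⟨(b-a).toNat, by omega⟩
  clear hab
  induction c generalizing a with
  | zero =>
    have ha : b = a := by omega
    subst ha
    rw [PySem.List.pyRange_one_eq_nil le_rfl]
    rfl
  | succ t ih =>
    have hlt : a < b := by omega
    rw [PySem.List.pyRange_one_cons hlt]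
    simp only [List.foldl_cons]
    rw [h a le_rfl hlt]
    exact ih (a+1) (fun x hx1 hx2 => h x (by omega) hx2) (by omega)

def pvColT (K N t : Nat) : List Int := (List.range (N+1)).map (fun i => pvT K i t)

theorem colT_zero (K N : Nat) : pvColT K N 0 = 1 :: List.replicate N (0:Int) := by
  unfold pvColT
  rw [List.range_succ_eq_map, List.map_cons, List.map_map]
  congr 1
  · simp [pvT]
  · rw [show ((fun i => pvT K i 0) ∘ Nat.succ) = (fun _ : Nat => (0:Int)) from
      funext (fun t => by simp [pvT])]
    simp [List.map_const']

theorem pvT_succ_col (K t : Nat) : ∀ i, pvT K i (t+1)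
    = pvT K i t + (((List.range i).map (fun r => pvT K r t)).sum
        - ((List.range (i-K)).map (fun r => pvT K r t)).sum) := by
  intro i
  cases i with
  | zero => simp [pvT]
  | succ i' =>
    simp only [pvT]
    rw [window_sum (fun r => pvT K r t) i' K]

theorem colStep (k : Int) (N t : Nat) :
    ((PySem.List.pyRange 0 ((N:Int)+1) 1).map (fun i =>
        PySem.List.pyGetD (pvColT k.toNat N t) i 0
          + PySem.List.pyGetD (pvPref [0] (pvColT k.toNat N t)) i 0
          - PySem.List.pyGetD (pvPref [0] (pvColT k.toNat N t)) (max 0 (i - max k 0)) 0))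
      = pvColT k.toNat N (t+1) := by
  have hlen : (pvColT k.toNat N t).length = N + 1 := by simp [pvColT]
  rw [show ((N:Int)+1) = ((N+1 : Nat) : Int) by push_cast; ring]
  rw [PySem.List.pyRange_zero_natCast, List.map_map]
  rw [show pvColT k.toNat N (t+1) = (List.range (N+1)).map (fun i => pvT k.toNat i (t+1)) from rfl]
  apply map_range_congr
  intro i hi
  simp only [Function.comp_apply, PySem.List.pyGetD_natCast]
  rw [show max 0 ((i:Int) - max k 0) = (((i - k.toNat : Nat)):Int) by omega]
  rw [PySem.List.pyGetD_natCast]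
  rw [pvPref_getD _ i (by omega), pvPref_getD _ (i - k.toNat) (by omega)]
  unfold pvColT
  rw [PySem.List.getD_map_range _ _ _ _ hi]
  rw [← List.map_take, ← List.map_take, List.take_range, List.take_range]
  rw [show min i (N+1) = i by omega, show min (i - k.toNat) (N+1) = i - k.toNat by omega]
  rw [pvT_succ_col]
  ring

theorem B_eq (n m k : Int) (hn : 0 ≤ n) (hm : 0 ≤ m) :
    build_tower_dp_alt n m k = pvT k.toNat n.toNat m.toNat := by
  obtain ⟨N, hN⟩ : ∃ N : Nat, n = (N:Int) := ⟨n.toNat, by omega⟩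
  subst hN
  simp only [build_tower_dp_alt, Int.toNat_natCast]
  rw [show (1 :: List.replicate N (0:Int)) = pvColT k.toNat N 0 from (colT_zero _ _).symm]
  rw [show pvColT k.toNat N 0 = (fun x : Int => pvColT k.toNat N x.toNat) 0 by norm_num]
  rw [foldl_pyRange_inv
      (fun (c : List Int) (_ : Int) =>
        (PySem.List.pyRange 0 ((N:Int)+1) 1).map (fun i =>
          PySem.List.pyGetD c i 0 + PySem.List.pyGetD (pvPref [0] c) i 0
            - PySem.List.pyGetD (pvPref [0] c) (max 0 (i - max k 0)) 0))
      (fun x : Int => pvColT k.toNat N x.toNat) 0 m hm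
      (by
        intro x hx1 hx2
        simp only
        rw [show (x+1).toNat = x.toNat + 1 by omega]
        exact colStep k N x.toNat)]
  rw [PySem.List.pyGetD_natCast]
  unfold pvColT
  rw [PySem.List.getD_map_range _ _ _ _ (by omega)]

def pvRowFull (K M r : Nat) : List Int := (List.range (M+1)).map (fun c => pvT K r c)
def pvRowPart (K M i j : Nat) (v : Int) : List Int :=
  (List.range (M+1)).map (fun c => if c < j then pvT K i c else if c = j then v else 0)
def pvDpC (K N M i j : Nat) (v : Int) : List (List Int) :=
  (List.range (N+1)).map (fun r => if r < i then pvRowFull K M r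
    else if r = i then pvRowPart K M i j v else List.replicate (M+1) 0)
def pvDpA (K N M i : Nat) : List (List Int) :=
  (List.range (N+1)).map (fun r => if r < i then pvRowFull K M r else List.replicate (M+1) 0)
def pvDpInit (N M t : Nat) : List (List Int) :=
  (List.range (N+1)).map (fun r =>
    if r = 0 then (List.range (M+1)).map (fun c => if c < t then (1:Int) else 0)
    else List.replicate (M+1) 0)

theorem pvT_pos_zero (K i : Nat) (hi : 1 ≤ i) : pvT K i 0 = 0 := by
  cases i with
  | zero => omega
  | succ i' => simp [pvT]

theorem get2_dpC_self (K N M i j : Nat) (v : Int) (hi : i ≤ N) (hj : j ≤ M) :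
    pvGet2 (pvDpC K N M i j v) ↑i ↑j = v := by
  simp only [pvGet2, PySem.List.pyGetD_natCast, pvDpC]
  rw [PySem.List.getD_map_range _ _ _ _ (by omega)]
  rw [if_neg (lt_irrefl i), if_pos rfl]
  unfold pvRowPart
  rw [PySem.List.getD_map_range _ _ _ _ (by omega)]
  rw [if_neg (lt_irrefl j), if_pos rfl]

theorem get2_dpC_below (K N M i j r c : Nat) (v : Int) (hr : r < i) (hi : i ≤ N) (hc : c ≤ M) :
    pvGet2 (pvDpC K N M i j v) ↑r ↑c = pvT K r c := by
  simp only [pvGet2, PySem.List.pyGetD_natCast, pvDpC]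
  rw [PySem.List.getD_map_range _ _ _ _ (by omega)]
  rw [if_pos hr]
  unfold pvRowFull
  rw [PySem.List.getD_map_range _ _ _ _ (by omega)]

theorem get2_dpC_left (K N M i j c : Nat) (v : Int) (hc : c < j) (hi : i ≤ N) (hcM : c ≤ M) :
    pvGet2 (pvDpC K N M i j v) ↑i ↑c = pvT K i c := by
  simp only [pvGet2, PySem.List.pyGetD_natCast, pvDpC]
  rw [PySem.List.getD_map_range _ _ _ _ (by omega)]
  rw [if_neg (lt_irrefl i), if_pos rfl]
  unfold pvRowPart
  rw [PySem.List.getD_map_range _ _ _ _ (by omega)]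
  rw [if_pos hc]

theorem set_map_range {α : Type} (q : Nat) (f : Nat → α) (t : Nat) (v : α) (_ht : t < q) :
    ((List.range q).map f).set t v = (List.range q).map (fun j => if j = t then v else f j) := by
  apply List.ext_getElem (by simp)
  intro i h1 h2
  simp only [List.getElem_set, List.getElem_map, List.getElem_range]
  by_cases h3 : t = i
  · simp [h3]
  · rw [if_neg h3, if_neg (fun h => h3 h.symm)]

theorem set2_dpC (K N M i j : Nat) (v w : Int) (hi : i ≤ N) (hj : j ≤ M) :
    pvSet2 (pvDpC K N M i j v) ↑i ↑j w = pvDpC K N M i j w := by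
  simp only [pvSet2, PySem.List.pySetD_natCast, PySem.List.pyGetD_natCast, pvDpC, pvRowPart]
  rw [PySem.List.getD_map_range _ _ _ _ (by omega : i < N+1)]
  rw [if_neg (lt_irrefl i), if_pos rfl]
  rw [set_map_range _ _ _ _ (by omega : j < M+1)]
  rw [set_map_range _ _ _ _ (by omega : i < N+1)]
  apply map_range_congr
  intro r hr
  by_cases h1 : r = i
  · subst h1
    rw [if_pos rfl, if_neg (lt_irrefl r), if_pos rfl]
    apply map_range_congr
    intro c hcq
    by_cases h2 : c = j
    · subst h2
      rw [if_pos rfl, if_neg (lt_irrefl c), if_pos rfl]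
    · by_cases hcj : c < j
      · rw [if_neg h2, if_pos hcj, if_pos hcj]
      · rw [if_neg h2, if_neg hcj, if_neg hcj, if_neg h2, if_neg h2]
  · simp [h1]

theorem dpInit_zero (N M : Nat) :
    pvDpInit N M 0 = List.replicate (N+1) (List.replicate (M+1) (0:Int)) := by
  unfold pvDpInit
  rw [map_range_congr _ _ (fun _ => List.replicate (M+1) (0:Int)) (by
    intro r hr
    by_cases h : r = 0
    · rw [if_pos h]
      rw [map_range_congr _ _ (fun _ => (0:Int)) (by intro c hc; simp)]
      simp [List.map_const']
    · rw [if_neg h])]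
  simp [List.map_const']

theorem init_step (N M t : Nat) (ht : t ≤ M) :
    pvSet2 (pvDpInit N M t) 0 (↑t) 1 = pvDpInit N M (t+1) := by
  have h0 : ((0:Nat):Int) = (0:Int) := rfl
  rw [← h0]
  show pvSet2 (pvDpInit N M t) ((0:Nat):Int) (↑t) 1 = pvDpInit N M (t+1)
  simp only [pvSet2, PySem.List.pySetD_natCast, PySem.List.pyGetD_natCast, pvDpInit]
  rw [PySem.List.getD_map_range _ _ _ _ (by omega : 0 < N+1)]
  rw [if_pos rfl]
  rw [set_map_range _ _ _ _ (by omega : t < M+1)]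
  rw [set_map_range _ _ _ _ (by omega : 0 < N+1)]
  apply map_range_congr
  intro r hr
  by_cases h1 : r = 0
  · subst h1
    rw [if_pos rfl, if_pos rfl]
    apply map_range_congr
    intro c hc
    by_cases h2 : c = t
    · rw [if_pos h2, if_pos (by omega : c < t+1)]
    · rw [if_neg h2]
      by_cases h3 : c < t
      · rw [if_pos h3, if_pos (by omega : c < t+1)]
      · rw [if_neg h3, if_neg (by omega : ¬ c < t+1)]
  · simp [h1]

theorem init_end (K N M : Nat) : pvDpInit N M (M+1) = pvDpA K N M 1 := by
  unfold pvDpInit pvDpA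
  apply map_range_congr
  intro r hr
  by_cases h1 : r = 0
  · subst h1
    rw [if_pos rfl, if_pos (by omega : 0 < 1)]
    unfold pvRowFull
    apply map_range_congr
    intro c hc
    rw [if_pos (by omega : c < M+1)]
    simp [pvT]
  · rw [if_neg h1, if_neg (by omega : ¬ r < 1)]

theorem dpC_start (K N M i : Nat) (hi : 1 ≤ i) : pvDpA K N M i = pvDpC K N M i 1 0 := by
  unfold pvDpA pvDpC
  apply map_range_congr
  intro r hr
  by_cases h1 : r < i
  · rw [if_pos h1, if_pos h1]
  · rw [if_neg h1, if_neg h1]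
    by_cases h2 : r = i
    · rw [if_pos h2]
      unfold pvRowPart
      rw [map_range_congr _ _ (fun _ => (0:Int)) (by
        intro c hc
        by_cases h3 : c < 1
        · rw [if_pos h3, show c = 0 by omega]
          subst h2
          exact pvT_pos_zero K r hi
        · rw [if_neg h3]
          by_cases h4 : c = 1
          · rw [if_pos h4]
          · rw [if_neg h4])]
      simp [List.map_const']
    · rw [if_neg h2]

theorem dpC_succ_col (K N M i j : Nat) :
    pvDpC K N M i j (pvT K i j) = pvDpC K N M i (j+1) 0 := by
  unfold pvDpC pvRowPart
  apply map_range_congr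
  intro r hr
  by_cases h1 : r < i
  · rw [if_pos h1, if_pos h1]
  · rw [if_neg h1, if_neg h1]
    by_cases h2 : r = i
    · rw [if_pos h2, if_pos h2]
      apply map_range_congr
      intro c hc
      by_cases h3 : c < j
      · rw [if_pos h3, if_pos (by omega : c < j+1)]
      · rw [if_neg h3]
        by_cases h4 : c = j
        · rw [if_pos h4, if_pos (by omega : c < j+1), h4]
        · rw [if_neg h4, if_neg (by omega : ¬ c < j+1)]
          by_cases h5 : c = j+1
          · rw [if_pos h5]
          · rw [if_neg h5]
    · rw [if_neg h2, if_neg h2]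

theorem dpC_end (K N M i : Nat) : pvDpC K N M i (M+1) 0 = pvDpA K N M (i+1) := by
  unfold pvDpC pvDpA
  apply map_range_congr
  intro r hr
  by_cases h1 : r < i
  · rw [if_pos h1, if_pos (by omega : r < i+1)]
  · rw [if_neg h1]
    by_cases h2 : r = i
    · rw [if_pos h2, if_pos (by omega : r < i+1), h2]
      unfold pvRowPart pvRowFull
      apply map_range_congr
      intro c hc
      rw [if_pos (by omega : c < M+1)]
    · rw [if_neg h2, if_neg (by omega : ¬ r < i+1)]

def pvS (K iN jN : Nat) (y : Int) : Int :=
  ((List.range (y-1).toNat).map (fun t => if t+1 ≤ iN then pvT K (iN-(t+1)) (jN-1) else 0)).sum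

theorem yloop (k : Int) (K N M iN jN : Nat)
    (_hi1 : 1 ≤ iN) (hiN : iN ≤ N) (hj1 : 1 ≤ jN) (hjM : jN ≤ M) (b : Int) :
    (PySem.List.pyRange 1 (k+1) 1).foldl
      (fun d y => if (iN:Int) ≥ y then
          pvSet2 d ↑iN ↑jN (pvGet2 d ↑iN ↑jN + pvGet2 d (↑iN - y) ((jN-1 : Nat):Int)) else d)
      (pvDpC K N M iN jN b)
    = pvDpC K N M iN jN (b + pvS K iN jN (k+1)) := by
  by_cases hk : 1 ≤ k + 1
  · have hS1 : pvS K iN jN 1 = 0 := by simp [pvS]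
    rw [show pvDpC K N M iN jN b = pvDpC K N M iN jN (b + pvS K iN jN 1) from by
      rw [hS1, add_zero]]
    rw [foldl_pyRange_inv _ (fun y => pvDpC K N M iN jN (b + pvS K iN jN y)) 1 (k+1) hk (by
      intro y hy1 hy2
      show _ = pvDpC K N M iN jN (b + pvS K iN jN (y+1))
      have hSstep : pvS K iN jN (y+1)
          = pvS K iN jN y + (if y ≤ (iN:Int) then pvT K (iN - y.toNat) (jN-1) else 0) := by
        unfold pvS
        rw [show ((y+1)-1).toNat = (y-1).toNat + 1 by omega, List.range_succ, List.map_append,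
          List.sum_append]
        simp only [List.map_cons, List.map_nil, List.sum_cons, List.sum_nil, add_zero]
        congr 1
        by_cases hc : y ≤ (iN:Int)
        · rw [if_pos (by omega : (y-1).toNat + 1 ≤ iN), if_pos hc]
          congr 1
          omega
        · rw [if_neg (by omega : ¬ ((y-1).toNat + 1 ≤ iN)), if_neg hc]
      by_cases hge : (iN:Int) ≥ y
      · rw [if_pos hge]
        rw [show ((iN:Int) - y) = ((iN - y.toNat : Nat) : Int) by omega]
        rw [get2_dpC_self K N M iN jN _ hiN hjM]
        rw [get2_dpC_below K N M iN jN (iN - y.toNat) (jN-1) _ (by omega) hiN (by omega)]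
        rw [set2_dpC K N M iN jN _ _ hiN hjM]
        rw [hSstep, if_pos hge, add_assoc]
      · rw [if_neg hge, hSstep, if_neg hge, add_zero])]
  · rw [PySem.List.pyRange_one_eq_nil (by omega), List.foldl_nil]
    have : pvS K iN jN (k+1) = 0 := by
      unfold pvS
      rw [show ((k+1)-1).toNat = 0 by omega]
      simp
    rw [this, add_zero]

theorem pvS_total (k : Int) (K iN jN : Nat) (hK : K = k.toNat) (h1 : 1 ≤ iN) (hj : 1 ≤ jN) :
    pvT K iN (jN-1) + pvS K iN jN (k+1) = pvT K iN jN := by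
  unfold pvS
  rw [show ((k+1)-1).toNat = K by omega]
  rw [ysum (fun r => pvT K r (jN-1)) iN K]
  obtain ⟨i', rfl⟩ : ∃ i', iN = i'+1 := ⟨iN-1, by omega⟩
  obtain ⟨j', rfl⟩ : ∃ j', jN = j'+1 := ⟨jN-1, by omega⟩
  simp only [Nat.add_sub_cancel]
  rw [show pvT K (i'+1) (j'+1)
      = pvT K (i'+1) j' + ((List.range (min K (i'+1))).map (fun y => pvT K (i'-y) j')).sum from by
    simp only [pvT]]

theorem jstep (k : Int) (K N M iN : Nat) (hK : K = k.toNat)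
    (hi1 : 1 ≤ iN) (hiN : iN ≤ N) (jN : Nat) (hj1 : 1 ≤ jN) (hjM : jN ≤ M) :
    (fun (d : List (List Int)) (j : Int) =>
        let d := pvSet2 d ↑iN j (pvGet2 d ↑iN j + pvGet2 d ↑iN (j-1))
        (PySem.List.pyRange 1 (k+1) 1).foldl (fun d y =>
          if (iN:Int) ≥ y then pvSet2 d ↑iN j (pvGet2 d ↑iN j + pvGet2 d (↑iN-y) (j-1)) else d) d)
      (pvDpC K N M iN jN 0) ↑jN
    = pvDpC K N M iN (jN+1) 0 := by
  simp only
  rw [show ((jN:Int) - 1) = ((jN - 1 : Nat):Int) by omega]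
  rw [get2_dpC_self K N M iN jN _ hiN hjM]
  rw [get2_dpC_left K N M iN jN (jN-1) _ (by omega) hiN (by omega)]
  rw [set2_dpC K N M iN jN _ _ hiN hjM]
  rw [yloop k K N M iN jN hi1 hiN hj1 hjM _]
  rw [← dpC_succ_col]
  congr 1
  rw [zero_add]
  exact pvS_total k K iN jN hK hi1 hj1

theorem istep (k : Int) (K N M iN : Nat) (hK : K = k.toNat) (hi1 : 1 ≤ iN) (hiN : iN ≤ N) :
    (fun (d : List (List Int)) (i : Int) =>
       (PySem.List.pyRange 1 ((M:Int)+1) 1).foldl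
         (fun d j =>
           let d := pvSet2 d i j (pvGet2 d i j + pvGet2 d i (j-1))
           (PySem.List.pyRange 1 (k+1) 1).foldl (fun d y =>
             if i ≥ y then pvSet2 d i j (pvGet2 d i j + pvGet2 d (i-y) (j-1)) else d) d) d)
      (pvDpA K N M iN) ↑iN
    = pvDpA K N M (iN+1) := by
  simp only
  rw [dpC_start K N M iN hi1]
  rw [show pvDpC K N M iN 1 0 = (fun j : Int => pvDpC K N M iN j.toNat 0) 1 from rfl]
  rw [foldl_pyRange_inv _ (fun j : Int => pvDpC K N M iN j.toNat 0) 1 ((M:Int)+1) (by omega) (by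
    intro j hj1 hj2
    rw [show j = ((j.toNat:Nat):Int) by omega]
    simp only [Int.toNat_natCast]
    rw [show (((j.toNat:Nat):Int)+1).toNat = j.toNat + 1 by omega]
    exact jstep k K N M iN hK hi1 hiN j.toNat (by omega) (by omega))]
  rw [show (((M:Int))+1).toNat = M+1 by omega]
  exact dpC_end K N M iN

theorem extract (K N M : Nat) : pvGet2 (pvDpA K N M (N+1)) (-1) (-1) = pvT K N M := by
  have hfull : pvDpA K N M (N+1) = (List.range (N+1)).map (fun r => pvRowFull K M r) := by
    unfold pvDpA
    apply map_range_congr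
    intro r hr
    rw [if_pos (by omega)]
  rw [hfull]
  unfold pvGet2
  rw [PySem.List.pyGetD_neg_one (xs := (List.range (N+1)).map (fun r => pvRowFull K M r))
    (h := by simp)]
  rw [List.getLast_eq_getElem]
  simp only [List.getElem_map, List.getElem_range, List.length_map, List.length_range,
    Nat.add_sub_cancel]
  unfold pvRowFull
  rw [PySem.List.pyGetD_neg_one (xs := (List.range (M+1)).map (fun c => pvT K N c))
    (h := by simp)]
  rw [List.getLast_eq_getElem]
  simp only [List.getElem_map, List.getElem_range, List.length_map, List.length_range,
    Nat.add_sub_cancel]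

theorem A_eq (n m k : Int) (hn : 0 ≤ n) (hm : 0 ≤ m) :
    build_tower_dp n m k = pvT k.toNat n.toNat m.toNat := by
  obtain ⟨N, rfl⟩ : ∃ N : Nat, n = (N:Int) := ⟨n.toNat, by omega⟩
  obtain ⟨M, rfl⟩ : ∃ M : Nat, m = (M:Int) := ⟨m.toNat, by omega⟩
  simp only [build_tower_dp, Int.toNat_natCast]
  have hd0 : (PySem.List.pyRange 0 ((N:Int)+1) 1).map (fun _ => List.replicate ((M:Int)+1).toNat (0:Int))
      = pvDpInit N M 0 := by
    rw [dpInit_zero, List.map_const']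
    rw [show ((M:Int)+1).toNat = M+1 by omega]
    congr 1
    rw [PySem.List.length_pyRange_one]
    omega
  rw [hd0]
  rw [show pvDpInit N M 0 = (fun x : Int => pvDpInit N M x.toNat) 0 from rfl]
  rw [foldl_pyRange_inv _ (fun x : Int => pvDpInit N M x.toNat) 0 ((M:Int)+1) (by omega) (by
    intro x hx1 hx2
    rw [show x = ((x.toNat:Nat):Int) by omega]
    simp only [Int.toNat_natCast]
    rw [show (((x.toNat:Nat):Int)+1).toNat = x.toNat + 1 by omega]
    exact init_step N M x.toNat (by omega))]
  rw [show ((M:Int)+1).toNat = M+1 by omega]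
  rw [init_end k.toNat N M]
  rw [show pvDpA k.toNat N M 1 = (fun i : Int => pvDpA k.toNat N M i.toNat) 1 from rfl]
  rw [foldl_pyRange_inv _ (fun i : Int => pvDpA k.toNat N M i.toNat) 1 ((N:Int)+1) (by omega) (by
    intro i hi1 hi2
    rw [show i = ((i.toNat:Nat):Int) by omega]
    simp only [Int.toNat_natCast]
    rw [show (((i.toNat:Nat):Int)+1).toNat = i.toNat + 1 by omega]
    exact istep k k.toNat N M i.toNat rfl (by omega) (by omega))]
  rw [show ((N:Int)+1).toNat = N+1 by omega]
  exact extract k.toNat N M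

theorem AB_eq (n m k : Int) (hn : 0 ≤ n) (hm : 0 ≤ m) :
    build_tower_dp n m k = build_tower_dp_alt n m k := by
  rw [A_eq n m k hn hm, B_eq n m k hn hm]

-- ===== VERDICT (by name: the statement is the Claim_ definition above) =====
theorem build_tower_dp_spec : Claim_equal_build_tower_dp := by
  intro n m k _ hpre
  unfold Pre_build_tower_dp at hpre
  unfold Spec_build_tower_dp
  exact AB_eq n m k hpre.1 hpre.2
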